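-- pv_equiv track=rewrite | github.com/ahmedzein1234/ielts-ai-practice-platform | workers/tasks/analytics.py | _aggregate_scoring_by_task_type
-- ===== SOURCE A (Python) =====
-- from typing import Dict, Any, Optional, List
--
-- def _aggregate_scoring_by_task_type(scoring_activity: List[Dict[str, Any]]) -> Dict[str, int]:
--     """Aggregate scoring activity by task type."""
--     if not scoring_activity:
--         return {}
--
--     totals = {}
--     for activity in scoring_activity:
--         for task_type, count in activity.items():
--             if task_type != "date":
--                 totals[task_type] = totals.get(task_type, 0) + count
--
--     return totals
-- ===== SOURCE B (Python) =====
-- from typing import Dict, Any, List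
--
-- def _aggregate_scoring_by_task_type(scoring_activity: List[Dict[str, Any]]) -> Dict[str, int]:
--     """Aggregate scoring activity by task type (column-wise: keys first, then per-key sums)."""
--     keys = dict.fromkeys(k for a in scoring_activity for k in a if k != "date")
--     return {k: sum(a.get(k, 0) for a in scoring_activity) for k in keys}
-- ===== Notes on version B (the rewrite author's own statement) =====
-- stated objective: alternative
-- what changed: Row-wise dict accumulation with a repeated get/insert is replaced by a transposed two-phase computation: first the ordered set of distinct non-'date' task types, then one column-wise summation pass per key; the empty-list guard disappears.
import Mathlib
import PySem

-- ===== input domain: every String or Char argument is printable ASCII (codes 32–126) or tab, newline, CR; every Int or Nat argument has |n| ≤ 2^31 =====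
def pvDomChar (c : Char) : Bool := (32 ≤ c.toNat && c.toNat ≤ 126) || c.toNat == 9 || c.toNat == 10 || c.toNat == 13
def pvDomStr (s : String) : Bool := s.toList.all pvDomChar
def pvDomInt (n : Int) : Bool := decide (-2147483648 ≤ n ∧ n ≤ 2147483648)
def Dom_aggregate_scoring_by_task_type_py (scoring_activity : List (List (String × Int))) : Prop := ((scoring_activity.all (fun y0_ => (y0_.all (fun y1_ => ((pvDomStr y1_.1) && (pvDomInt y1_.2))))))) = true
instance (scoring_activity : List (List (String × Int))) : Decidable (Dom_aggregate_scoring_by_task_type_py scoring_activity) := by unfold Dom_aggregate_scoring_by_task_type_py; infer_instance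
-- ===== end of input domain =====

-- B replaces A's row-wise dict accumulation by a transposed two-phase computation (ordered distinct keys, then per-key column sums); alternative decomposition, same results.


-- ===== PORT A =====
def aggregate_scoring_by_task_type_py (scoring_activity : List (List (String × Int))) : List (String × Int) :=
  if scoring_activity = [] then []
  else
    (scoring_activity.foldl
        (fun totals activity =>
          activity.foldl
            (fun totals p =>
              if p.1 ≠ "date" then totals.insert p.1 (totals.getD p.1 0 + p.2) else totals)
            totals)
        PySem.Dict.empty).items

-- ===== PORT B =====
def aggregate_scoring_by_task_type_py_alt (scoring_activity : List (List (String × Int))) : List (String × Int) :=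
  let keys := PySem.List.dedup
    (scoring_activity.flatMap (fun a => (a.map Prod.fst).filter (fun k => !(k == "date"))))
  keys.map (fun k =>
    (k, scoring_activity.foldl (fun s a => s + (PySem.Dict.mk a).getD k 0) 0))

-- ===== PRECONDITION & SPEC =====
-- Pre_ only states the dict-representation invariant: each inner association list stands for a
-- Python dict, whose keys are necessarily distinct; no actual Python input is excluded.
def Pre_aggregate_scoring_by_task_type_py (scoring_activity : List (List (String × Int))) : Prop :=
  ∀ a ∈ scoring_activity, (a.map Prod.fst).Nodup
instance (scoring_activity : List (List (String × Int))) : Decidable (Pre_aggregate_scoring_by_task_type_py scoring_activity) := by unfold Pre_aggregate_scoring_by_task_type_py; infer_instance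

def pvWitness_aggregate_scoring_by_task_type_py : (List (List (String × Int))) :=
  [[("reading", 2), ("date", 7)], [("reading", 1), ("writing", 3)]]

def Spec_aggregate_scoring_by_task_type_py (scoring_activity : List (List (String × Int))) (out : List (String × Int)) : Prop := out = aggregate_scoring_by_task_type_py_alt scoring_activity
instance (scoring_activity : List (List (String × Int))) (out : List (String × Int)) : Decidable (Spec_aggregate_scoring_by_task_type_py scoring_activity out) := by unfold Spec_aggregate_scoring_by_task_type_py; infer_instance

-- ===== CLAIM (what is proved, stated in full; the proofs are below) =====
def Claim_equal_aggregate_scoring_by_task_type_py : Prop := ∀ (scoring_activity : List (List (String × Int))), Dom_aggregate_scoring_by_task_type_py scoring_activity → Pre_aggregate_scoring_by_task_type_py scoring_activity → Spec_aggregate_scoring_by_task_type_py scoring_activity (aggregate_scoring_by_task_type_py scoring_activity)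

-- ===== LEMMAS AND PROOFS =====

-- the step functions of A's two nested loops, named for the proofs
def pvStep (d : PySem.Dict String Int) (p : String × Int) : PySem.Dict String Int :=
  if p.1 ≠ "date" then d.insert p.1 (d.getD p.1 0 + p.2) else d

def pvInner (d : PySem.Dict String Int) (a : List (String × Int)) : PySem.Dict String Int :=
  a.foldl pvStep d

-- value invariant of the inner loop (keys of a distinct)
theorem pvInner_getD (a : List (String × Int)) (d : PySem.Dict String Int) (k : String)
    (hk : k ≠ "date") (hnd : (a.map Prod.fst).Nodup) :
    (pvInner d a).getD k 0 = d.getD k 0 + (PySem.Dict.mk a).getD k 0 := by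
  induction a generalizing d with
  | nil => simp [pvInner, PySem.Dict.getD, PySem.Dict.get?]
  | cons p rest ih =>
    obtain ⟨k', v⟩ := p
    simp only [List.map_cons, List.nodup_cons] at hnd
    by_cases hd : k' = "date"
    · subst hd
      have : pvInner d (("date", v) :: rest) = pvInner d rest := by
        simp [pvInner, pvStep]
      rw [this, ih d hnd.2]
      have : (PySem.Dict.mk (("date", v) :: rest)).getD k 0 = (PySem.Dict.mk rest).getD k 0 := by
        simp [PySem.Dict.getD_eq_get?_getD, PySem.Dict.get?_mk_cons, (Ne.symm hk)]
      rw [this]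
    · have hstep : pvInner d ((k', v) :: rest) = pvInner (d.insert k' (d.getD k' 0 + v)) rest := by
        simp [pvInner, pvStep, hd]
      rw [hstep, ih _ hnd.2]
      rw [PySem.Dict.getD_insert]
      have hmk : (PySem.Dict.mk ((k', v) :: rest)).getD k 0 =
          if k' = k then v else (PySem.Dict.mk rest).getD k 0 := by
        by_cases hkk : k' = k
        · simp [PySem.Dict.getD_eq_get?_getD, PySem.Dict.get?_mk_cons, hkk]
        · simp [PySem.Dict.getD_eq_get?_getD, PySem.Dict.get?_mk_cons, hkk]
      rw [hmk]
      by_cases hkk : k = k'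
      · subst hkk
        have hnc : (PySem.Dict.mk rest).getD k 0 = 0 := by
          apply PySem.Dict.getD_of_not_contains
          rw [PySem.Dict.contains_eq_decide_mem_keys]
          simp [PySem.Dict.keys_mk, hnd.1]
        simp [hnc]
      · simp [hkk, Ne.symm hkk]

-- key-order invariant of the inner loop
theorem pvInner_keys (a : List (String × Int)) (d : PySem.Dict String Int) :
    (pvInner d a).keys =
      PySem.Set.update d.keys ((a.map Prod.fst).filter (fun k => !(k == "date"))) := by
  induction a generalizing d with
  | nil => simp [pvInner, PySem.Set.update]
  | cons p rest ih =>
    obtain ⟨k', v⟩ := p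
    by_cases hd : k' = "date"
    · subst hd
      have : pvInner d (("date", v) :: rest) = pvInner d rest := by simp [pvInner, pvStep]
      rw [this, ih d]
      simp
    · have hstep : pvInner d ((k', v) :: rest) = pvInner (d.insert k' (d.getD k' 0 + v)) rest := by
        simp [pvInner, pvStep, hd]
      rw [hstep, ih]
      have hkeys : (d.insert k' (d.getD k' 0 + v)).keys = PySem.Set.add d.keys k' := by
        by_cases hc : d.contains k' = true
        · rw [PySem.Dict.keys_insert_of_contains _ _ hc,
            PySem.Set.add_of_mem ((PySem.Dict.contains_iff_mem_keys _ _).mp hc)]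
        · have hcf : d.contains k' = false := by simpa using hc
          rw [PySem.Dict.keys_insert_of_not_contains _ _ hcf,
            PySem.Set.add_of_not_mem
              (fun hm => hc ((PySem.Dict.contains_iff_mem_keys _ _).mpr hm))]
      rw [hkeys]
      simp [hd, PySem.Set.update_cons]

-- the flattened non-"date" key stream that B dedups
def pvFlatKeys (sa : List (List (String × Int))) : List String :=
  sa.flatMap (fun a => (a.map Prod.fst).filter (fun k => !(k == "date")))

-- value invariant of the outer loop
theorem pvOuter_getD (sa : List (List (String × Int))) (d : PySem.Dict String Int) (k : String)
    (hk : k ≠ "date") (hnd : ∀ a ∈ sa, (a.map Prod.fst).Nodup) :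
    (sa.foldl pvInner d).getD k 0 =
      d.getD k 0 + sa.foldl (fun s a => s + (PySem.Dict.mk a).getD k 0) 0 := by
  induction sa generalizing d with
  | nil => simp
  | cons a rest ih =>
    simp only [List.foldl_cons]
    rw [ih _ (fun b hb => hnd b (List.mem_cons_of_mem _ hb)),
      pvInner_getD a d k hk (hnd a (List.mem_cons_self))]
    rw [PySem.List.foldl_add, PySem.List.foldl_add]
    ring

-- key-order invariant of the outer loop
theorem pvOuter_keys (sa : List (List (String × Int))) (d : PySem.Dict String Int) :
    (sa.foldl pvInner d).keys = PySem.Set.update d.keys (pvFlatKeys sa) := by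
  induction sa generalizing d with
  | nil => simp [pvFlatKeys, PySem.Set.update]
  | cons a rest ih =>
    simp only [List.foldl_cons, pvFlatKeys, List.flatMap_cons]
    rw [ih, pvInner_keys, PySem.Set.update_append]
    rfl

theorem pvFinal_keys (sa : List (List (String × Int))) :
    (sa.foldl pvInner PySem.Dict.empty).keys = PySem.Set.ofList (pvFlatKeys sa) := by
  rw [pvOuter_keys]
  simp [PySem.Dict.keys_empty, PySem.Set.update_nil_left]

-- ===== VERDICT (by name: the statement is the Claim_ definition above) =====
theorem aggregate_scoring_by_task_type_py_spec : Claim_equal_aggregate_scoring_by_task_type_py := by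
  intro sa _hdom hpre
  unfold Spec_aggregate_scoring_by_task_type_py
  unfold aggregate_scoring_by_task_type_py aggregate_scoring_by_task_type_py_alt
  by_cases hsa : sa = []
  · subst hsa; simp [PySem.List.dedup]
  · simp only [hsa, if_false]
    set D := sa.foldl pvInner PySem.Dict.empty with hD
    have hfold : sa.foldl
        (fun totals activity =>
          activity.foldl
            (fun totals p =>
              if p.1 ≠ "date" then totals.insert p.1 (totals.getD p.1 0 + p.2) else totals)
            totals)
        PySem.Dict.empty = D := rfl
    rw [hfold]
    have hkeys : D.keys = PySem.Set.ofList (pvFlatKeys sa) := pvFinal_keys sa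
    have hnodup : D.keys.Nodup := by rw [hkeys]; exact PySem.Set.nodup_ofList _
    rw [PySem.Dict.items_eq_map_keys D hnodup 0, hkeys]
    have hded : PySem.List.dedup
        (sa.flatMap (fun a => (a.map Prod.fst).filter (fun k => !(k == "date")))) =
        PySem.Set.ofList (pvFlatKeys sa) := by
      simp [pvFlatKeys]
    rw [hded]
    apply List.map_congr_left
    intro k hkmem
    have hkflat : k ∈ pvFlatKeys sa := (PySem.Set.mem_ofList _ _).mp hkmem
    have hk : k ≠ "date" := by
      simp only [pvFlatKeys, List.mem_flatMap, List.mem_filter] at hkflat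
      obtain ⟨a, _, _, hne⟩ := hkflat
      simpa using hne
    have := pvOuter_getD sa PySem.Dict.empty k hk hpre
    rw [hD, this]
    simp
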